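-- pv_equiv track=rewrite | github.com/fvaldecan/Algorithm-Analysis | Project1/p1_task3.py | cf_count
-- ===== SOURCE A (Python) =====
-- def cf_count(a,b,count):
--     #Count the number of comparisons for two lists of prime common factors
--     count = 0
--     common_factors = []
--     for i in range(len(a)):
--         for j in range(len(b)):
--             count += 1
--             if(a[i] == b[j]):
--                 common_factors.append(a[i])
--                 b.remove(b[j])
--                 break
--     return count
-- ===== SOURCE B (Python) =====
-- def cf_count(a, b, count):
--     # Index-queue reformulation: group b's positions by value once, then for each
--     # element of a pop its next original position and convert it to a rank among
--     # the still-present elements; b is mutated to its remaining elements as in A.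
--     count = 0
--     pos = {}
--     for i, v in enumerate(b):
--         pos.setdefault(v, []).append(i)
--     removed = []
--     for x in a:
--         lst = pos.get(x)
--         if lst:
--             p = lst.pop(0)
--             before = 0
--             for r in removed:
--                 if r < p:
--                     before += 1
--             count += p + 1 - before
--             removed.append(p)
--         else:
--             count += len(b) - len(removed)
--     gone = set(removed)
--     b[:] = [v for i, v in enumerate(b) if i not in gone]
--     return count
-- ===== Notes on version B (the rewrite author's own statement) =====
-- stated objective: faster
-- what changed: Instead of rescanning the mutating list b from the front for every element of a, B groups b's positions by value into queues once, pops the next original position per matched element and converts it to a current rank by counting previously removed earlier positions; unmatched elements contribute the current remaining length in O(1).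
import Mathlib
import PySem

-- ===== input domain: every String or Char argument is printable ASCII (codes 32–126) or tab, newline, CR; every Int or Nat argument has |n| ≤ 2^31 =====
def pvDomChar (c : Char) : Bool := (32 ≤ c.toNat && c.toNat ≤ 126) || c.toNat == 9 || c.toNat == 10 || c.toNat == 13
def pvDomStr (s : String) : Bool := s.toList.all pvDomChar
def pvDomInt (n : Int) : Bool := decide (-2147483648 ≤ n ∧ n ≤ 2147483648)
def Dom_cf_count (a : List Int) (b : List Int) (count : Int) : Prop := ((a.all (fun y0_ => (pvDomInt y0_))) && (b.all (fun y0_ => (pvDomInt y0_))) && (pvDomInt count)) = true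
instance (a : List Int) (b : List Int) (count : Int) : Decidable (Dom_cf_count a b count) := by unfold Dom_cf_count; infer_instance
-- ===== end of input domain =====

-- B replaces A's nested rescans of the shrinking list b with per-value index queues built
-- once from b plus a count of already-removed earlier positions (objective: alternative
-- algorithm; equivalence is about the return value — Python A mutates b in place by
-- removing matched elements, and Python B performs the same mutation of b at the end).

-- ===== PORT A =====
-- inner loop of A over the current b: one comparison per scanned element,
-- remove the matched element and break (A's common_factors list never affects the result)
def pvInnerA (x : Int) : List Int → Int → Int × List Int
  | [], c => (c, [])
  | y :: ys, c =>
    if x = y then (c + 1, ys)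
    else
      let r := pvInnerA x ys (c + 1)
      (r.1, y :: r.2)

def cf_count (a : List Int) (b : List Int) (count : Int) : Int :=
  (a.foldl (fun s x => pvInnerA x s.2 s.1) ((0 : Int), b)).1

-- ===== PORT B =====
def cf_count_alt (a : List Int) (b : List Int) (count : Int) : Int :=
  let pos := (PySem.List.enumerate b).foldl
      (fun d iv => d.modify iv.2 [] (· ++ [iv.1])) PySem.Dict.empty
  (a.foldl
    (fun (s : Int × PySem.Dict Int (List Int) × List Int) x =>
      match PySem.Dict.get? s.2.1 x with
      | some (p :: rest) =>
        let before := s.2.2.foldl (fun acc r => if r < p then acc + 1 else acc) (0 : Int)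
        (s.1 + p + 1 - before, s.2.1.insert x rest, s.2.2 ++ [p])
      | _ => (s.1 + ((b.length : Int) - (s.2.2.length : Int)), s.2.1, s.2.2))
    ((0 : Int), pos, ([] : List Int))).1

-- ===== PRECONDITION & SPEC =====
def Spec_cf_count (a : List Int) (b : List Int) (count : Int) (out : Int) : Prop := out = cf_count_alt a b count
instance (a : List Int) (b : List Int) (count : Int) (out : Int) : Decidable (Spec_cf_count a b count out) := by unfold Spec_cf_count; infer_instance

-- ===== CLAIM (what is proved, stated in full; the proofs are below) =====
def Claim_equal_cf_count : Prop := ∀ (a : List Int) (b : List Int) (count : Int), Dom_cf_count a b count → Spec_cf_count a b count (cf_count a b count)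

-- ===== LEMMAS AND PROOFS =====
def posF (e : List (Int × Int)) (x : Int) : List Int := (e.filter (fun iv => iv.2 == x)).map (·.1)
def posR (e : List (Int × Int)) (x : Int) (R : List Int) : List Int :=
  (posF e x).filter (fun p => decide (p ∉ R))
def keptV (e : List (Int × Int)) (R : List Int) : List Int :=
  (e.filter (fun iv => decide (iv.1 ∉ R))).map (·.2)

lemma innerA_spec (x : Int) (l : List Int) (c : Int) :
    pvInnerA x l c = if x ∈ l then (c + (l.idxOf x : Int) + 1, l.erase x)
                     else (c + (l.length : Int), l) := by
  induction l generalizing c with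
  | nil => simp [pvInnerA]
  | cons y ys ih =>
    by_cases hxy : x = y
    · subst hxy; simp [pvInnerA]
    · have hyx : y ≠ x := fun h => hxy h.symm
      by_cases hx : x ∈ ys
      · simp [pvInnerA, hxy, ih, hx, hyx, List.idxOf_cons_ne, List.erase_cons_tail]
        omega
      · simp [pvInnerA, hxy, ih, hx, hyx]
        omega

lemma mem_posF {e : List (Int × Int)} {p x : Int} : p ∈ posF e x ↔ (p, x) ∈ e := by
  unfold posF
  simp only [List.mem_map, List.mem_filter, beq_iff_eq]
  constructor
  · rintro ⟨⟨q, y⟩, ⟨hm, hy⟩, hp⟩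
    simp only at hy hp
    subst hy; subst hp
    exact hm
  · intro h
    exact ⟨(p, x), ⟨h, rfl⟩, rfl⟩

lemma mem_posR {e : List (Int × Int)} {p x : Int} {R : List Int} (h : p ∈ posR e x R) :
    (p, x) ∈ e ∧ p ∉ R := by
  have := List.mem_filter.mp h
  exact ⟨mem_posF.mp this.1, by simpa using this.2⟩

lemma posR_congr {e : List (Int × Int)} {x : Int} {R R' : List Int}
    (h : ∀ p ∈ posF e x, (p ∈ R ↔ p ∈ R')) : posR e x R = posR e x R' := by
  unfold posR
  apply List.filter_congr
  intro p hp
  simp [h p hp]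

lemma keptV_congr {e : List (Int × Int)} {R R' : List Int}
    (h : ∀ iv ∈ e, (iv.1 ∈ R ↔ iv.1 ∈ R')) : keptV e R = keptV e R' := by
  unfold keptV
  congr 1
  apply List.filter_congr
  intro iv hiv
  simp [h iv hiv]

lemma fst_inj {e : List (Int × Int)} (hnd : (e.map (·.1)).Nodup) {p x y : Int}
    (h1 : (p, x) ∈ e) (h2 : (p, y) ∈ e) : x = y := by
  have := List.inj_on_of_nodup_map hnd h1 h2 (by rfl)
  exact congrArg Prod.snd this

lemma countP_split (R : List Int) (hR : R.Nodup) (s p : Int) (hsp : s < p) :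
    R.countP (fun r => decide (s ≤ r ∧ r < p))
      = R.countP (fun r => decide (s + 1 ≤ r ∧ r < p)) + (if s ∈ R then 1 else 0) := by
  induction R with
  | nil => simp
  | cons r R' ih =>
    have hR' : R'.Nodup := hR.of_cons
    rw [List.countP_cons, List.countP_cons]
    by_cases hrs : r = s
    · subst hrs
      have hs : r ∉ R' := (List.nodup_cons.mp hR).1
      have hcong : R'.countP (fun q => decide (r ≤ q ∧ q < p))
          = R'.countP (fun q => decide (r + 1 ≤ q ∧ q < p)) := by
        apply List.countP_congr
        intro a ha
        have hne : a ≠ r := fun h => hs (h ▸ ha)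
        have hiff : (r ≤ a ∧ a < p) ↔ (r + 1 ≤ a ∧ a < p) := by omega
        simp only [decide_eq_true_eq]
        exact hiff
      have e1 : (decide (r ≤ r ∧ r < p) : Bool) = true := by
        simp only [decide_eq_true_eq]
        omega
      have e2 : (decide (r + 1 ≤ r ∧ r < p) : Bool) = false := by
        simp only [decide_eq_false_iff_not]
        omega
      rw [hcong, e1, e2, if_pos List.mem_cons_self]
      simp
    · have hmem : (s ∈ r :: R') ↔ s ∈ R' := by simp [Ne.symm hrs]
      have hpq : (decide (s ≤ r ∧ r < p) : Bool) = decide (s + 1 ≤ r ∧ r < p) := by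
        simp only [decide_eq_decide]
        omega
      rw [hpq, ih hR']
      by_cases hsR : s ∈ R'
      · rw [if_pos hsR, if_pos (hmem.mpr hsR)]
        omega
      · rw [if_neg hsR, if_neg (fun h => hsR (hmem.mp h))]
        omega

lemma countP_nodup_sub (l R : List Int) (hl : l.Nodup) (hR : R.Nodup)
    (hsub : ∀ r ∈ R, r ∈ l) : l.countP (fun r => decide (r ∈ R)) = R.length := by
  have hperm : (l.filter (fun r => decide (r ∈ R))).Perm R := by
    rw [List.perm_ext_iff_of_nodup (hl.filter _) hR]
    intro a
    simp only [List.mem_filter, decide_eq_true_eq]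
    exact ⟨fun h => h.2, fun h => ⟨hsub a h, h⟩⟩
  rw [List.countP_eq_length_filter]
  exact hperm.length_eq

lemma keptV_length (e : List (Int × Int)) (R : List Int)
    (hnd : (e.map (·.1)).Nodup) (hR : R.Nodup) (hRm : ∀ r ∈ R, r ∈ e.map (·.1)) :
    (keptV e R).length + R.length = e.length := by
  unfold keptV
  rw [List.length_map, ← List.countP_eq_length_filter]
  have h1 : e.countP (fun iv => decide (iv.1 ∈ R)) = R.length := by
    have h := countP_nodup_sub (e.map (·.1)) R hnd hR hRm
    rw [List.countP_map] at h
    exact h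
  have h2 := (List.length_eq_countP_add_countP (l := e) (fun iv => decide (iv.1 ∈ R)))
  have h3 : e.countP (fun iv => decide (iv.1 ∉ R)) = e.countP (fun iv => ¬ decide (iv.1 ∈ R)) := by
    apply List.countP_congr
    intro a _
    simp
  omega

lemma posR_cons (i v x : Int) (e : List (Int × Int)) (R : List Int) :
    posR ((i, v) :: e) x R
      = if v = x ∧ i ∉ R then i :: posR e x R else posR e x R := by
  simp only [posR, posF, List.filter_cons]
  by_cases hv : v = x
  · by_cases hiR : i ∈ R <;> simp [hv, hiR]
  · simp [hv]

lemma keptV_cons (i v : Int) (e : List (Int × Int)) (R : List Int) :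
    keptV ((i, v) :: e) R = if i ∈ R then keptV e R else v :: keptV e R := by
  simp only [keptV, List.filter_cons]
  by_cases hiR : i ∈ R <;> simp [hiR]

lemma posR_append_irrelevant {e : List (Int × Int)} {x q : Int} {R : List Int}
    (h : ∀ p ∈ posF e x, p ≠ q) : posR e x (R ++ [q]) = posR e x R := by
  apply posR_congr
  intro p hp
  simp [h p hp]

lemma keptV_append_irrelevant {e : List (Int × Int)} {q : Int} {R : List Int}
    (h : ∀ iv ∈ e, iv.1 ≠ q) : keptV e (R ++ [q]) = keptV e R := by
  apply keptV_congr
  intro iv hiv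
  simp [h iv hiv]

lemma keyLemma (x : Int) (R : List Int) (hR : R.Nodup) :
    ∀ (e : List (Int × Int)) (s : Int),
      e.map (·.1) = PySem.List.pyRange s (s + e.length) 1 →
      ((posR e x R = [] → x ∉ keptV e R) ∧
       (∀ p rest, posR e x R = p :: rest →
          x ∈ keptV e R ∧
          ((keptV e R).idxOf x : Int)
            = p - s - (R.countP (fun r => decide (s ≤ r ∧ r < p)) : Int) ∧
          (keptV e R).erase x = keptV e (R ++ [p]) ∧
          rest = posR e x (R ++ [p]))) := by
  intro e
  induction e with
  | nil =>
    intro s _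
    constructor
    · intro _
      simp [keptV]
    · intro p rest h
      simp [posR, posF] at h
  | cons iv e' ih =>
    intro s hIdx
    obtain ⟨i, v⟩ := iv
    simp only [List.map_cons, List.length_cons] at hIdx
    have hpos : s < s + ((e'.length : Int) + 1) := by omega
    rw [show (((e'.length + 1 : Nat)) : Int) = (e'.length : Int) + 1 by push_cast; ring] at hIdx
    rw [PySem.List.pyRange_one_cons hpos] at hIdx
    obtain ⟨hi, hIdx'⟩ := List.cons_eq_cons.mp hIdx
    subst hi
    have hIdx'' : e'.map (·.1) = PySem.List.pyRange (i + 1) ((i + 1) + e'.length) 1 := by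
      rw [hIdx']
      congr 1
      omega
    have hmem' : ∀ q ∈ e'.map (·.1), i + 1 ≤ q ∧ q < (i + 1) + e'.length := by
      intro q hq
      rw [hIdx''] at hq
      exact (PySem.List.mem_pyRange_one).mp hq
    have ihh := ih (i + 1) hIdx''
    constructor
    · intro hnil
      rw [posR_cons] at hnil
      by_cases hiR : i ∈ R
      · rw [if_neg (by simp [hiR] : ¬(v = x ∧ i ∉ R))] at hnil
        rw [keptV_cons, if_pos hiR]
        exact ihh.1 hnil
      · by_cases hv : v = x
        · rw [if_pos ⟨hv, hiR⟩] at hnil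
          exact absurd hnil (by simp)
        · rw [if_neg (by simp [hv] : ¬(v = x ∧ i ∉ R))] at hnil
          rw [keptV_cons, if_neg hiR]
          have hx' := ihh.1 hnil
          simp only [List.mem_cons, not_or]
          exact ⟨fun hxy => hv hxy.symm, hx'⟩
    · intro p rest hpr
      rw [posR_cons] at hpr
      by_cases hiR : i ∈ R
      · -- head index already removed
        rw [if_neg (by simp [hiR] : ¬(v = x ∧ i ∉ R))] at hpr
        obtain ⟨hmem, hidx, herase, hrest⟩ := ihh.2 p rest hpr
        have hpmem : p ∈ posR e' x R := by rw [hpr]; exact List.mem_cons_self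
        have hp_mem : p ∈ e'.map (·.1) :=
          List.mem_map.mpr ⟨(p, x), (mem_posR hpmem).1, rfl⟩
        have hp_lb : i + 1 ≤ p := (hmem' p hp_mem).1
        have hcount := countP_split R hR i p (by omega)
        rw [if_pos hiR] at hcount
        refine ⟨?_, ?_, ?_, ?_⟩
        · rw [keptV_cons, if_pos hiR]; exact hmem
        · rw [keptV_cons, if_pos hiR, hidx]
          omega
        · rw [keptV_cons, if_pos hiR, keptV_cons, if_pos (List.mem_append_left _ hiR)]
          exact herase
        · rw [posR_cons, if_neg (by simp [hiR] : ¬(v = x ∧ i ∉ R ++ [p]))]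
          exact hrest
      · by_cases hv : v = x
        · -- the head entry is the match: p = i
          rw [if_pos ⟨hv, hiR⟩] at hpr
          obtain ⟨hpi, hrest⟩ := List.cons_eq_cons.mp hpr
          have hne' : ∀ q ∈ posF e' x, q ≠ p := by
            intro q hq
            have : (q, x) ∈ e' := mem_posF.mp hq
            have := hmem' q (List.mem_map.mpr ⟨(q, x), this, rfl⟩)
            omega
          have hkne : ∀ iv' ∈ e', iv'.1 ≠ p := by
            intro iv' hiv'
            have := hmem' iv'.1 (List.mem_map.mpr ⟨iv', hiv', rfl⟩)
            omega
          refine ⟨?_, ?_, ?_, ?_⟩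
          · rw [keptV_cons, if_neg hiR, hv]
            exact List.mem_cons_self
          · rw [keptV_cons, if_neg hiR, hv, List.idxOf_cons_self]
            have hz : R.countP (fun r => decide (i ≤ r ∧ r < p)) = 0 := by
              apply List.countP_eq_zero.mpr
              intro a _
              simp only [decide_eq_true_eq]
              omega
            rw [hz]
            omega
          · rw [keptV_cons, if_neg hiR, hv, List.erase_cons_head]
            rw [keptV_cons, if_pos (by rw [hpi]; exact List.mem_append_right _ (List.mem_singleton.mpr rfl))]
            exact (keptV_append_irrelevant hkne).symm
          · rw [posR_cons, if_neg (by
              simp only [List.mem_append, List.mem_singleton, not_and, not_not]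
              intro _
              exact Or.inr hpi)]
            rw [posR_append_irrelevant hne']
            exact hrest.symm
        · -- head kept, value differs
          rw [if_neg (by simp [hv] : ¬(v = x ∧ i ∉ R))] at hpr
          obtain ⟨hmem, hidx, herase, hrest⟩ := ihh.2 p rest hpr
          have hpmem : p ∈ posR e' x R := by rw [hpr]; exact List.mem_cons_self
          have hp_mem : p ∈ e'.map (·.1) :=
            List.mem_map.mpr ⟨(p, x), (mem_posR hpmem).1, rfl⟩
          have hp_lb : i + 1 ≤ p := (hmem' p hp_mem).1
          have hcount := countP_split R hR i p (by omega)
          rw [if_neg hiR] at hcount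
          have hvne : v ≠ x := hv
          refine ⟨?_, ?_, ?_, ?_⟩
          · rw [keptV_cons, if_neg hiR]
            exact List.mem_cons_of_mem v hmem
          · rw [keptV_cons, if_neg hiR, List.idxOf_cons_ne _ hvne]
            push_cast
            rw [hidx]
            omega
          · rw [keptV_cons, if_neg hiR, List.erase_cons_tail (by simp [hvne])]
            rw [keptV_cons, if_neg (by
              simp only [List.mem_append, List.mem_singleton, not_or]
              exact ⟨hiR, by omega⟩)]
            rw [herase]
          · rw [posR_cons, if_neg (by simp [hv] : ¬(v = x ∧ i ∉ R ++ [p]))]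
            exact hrest

lemma build_getD (e : List (Int × Int)) (x : Int) :
    (e.foldl (fun d iv => d.modify iv.2 [] (· ++ [iv.1])) PySem.Dict.empty).getD x []
      = posF e x := by
  have h1 : e.foldl (fun d iv => d.modify iv.2 [] (· ++ [iv.1])) PySem.Dict.empty
      = (e.map Prod.swap).foldl (fun d q => d.modify q.1 [] (· ++ [q.2])) PySem.Dict.empty := by
    rw [List.foldl_map]
    rfl
  rw [h1, PySem.Dict.getD_foldl_modify_append, PySem.Dict.getD_empty]
  simp [posF, List.filter_map, List.map_map, Function.comp_def]


def stepA (s : Int × List Int) (x : Int) : Int × List Int := pvInnerA x s.2 s.1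

def stepB (b : List Int) (s : Int × PySem.Dict Int (List Int) × List Int) (x : Int) :
    Int × PySem.Dict Int (List Int) × List Int :=
  match PySem.Dict.get? s.2.1 x with
  | some (p :: rest) =>
    (s.1 + p + 1 - (s.2.2.foldl (fun acc r => if r < p then acc + 1 else acc) (0 : Int)),
     s.2.1.insert x rest, s.2.2 ++ [p])
  | _ => (s.1 + ((b.length : Int) - (s.2.2.length : Int)), s.2.1, s.2.2)

lemma loopLemma (b : List Int) :
    ∀ (a' : List Int) (c : Int) (d : PySem.Dict Int (List Int)) (R : List Int),
      (∀ x, d.getD x [] = posR (PySem.List.enumerate b) x R) →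
      R.Nodup →
      (∀ r ∈ R, r ∈ (PySem.List.enumerate b).map (·.1)) →
      (a'.foldl stepA (c, keptV (PySem.List.enumerate b) R)).1
        = (a'.foldl (stepB b) (c, d, R)).1 := by
  intro a'
  induction a' with
  | nil =>
    intro c d R _ _ _
    rfl
  | cons x a'' ih =>
    intro c d R hinv hR hRm
    have hIdx : (PySem.List.enumerate b).map (·.1)
        = PySem.List.pyRange 0 (0 + ((PySem.List.enumerate b).length : Int)) 1 := by
      rw [PySem.List.map_fst_enumerate, PySem.List.length_enumerate]
    have hnd : ((PySem.List.enumerate b).map (·.1)).Nodup := by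
      rw [hIdx]
      exact PySem.List.nodup_pyRange_one _ _
    have key := keyLemma x R hR (PySem.List.enumerate b) 0 hIdx
    cases hl : d.getD x [] with
    | nil =>
      have hpos : posR (PySem.List.enumerate b) x R = [] := by rw [← hinv x]; exact hl
      have hnotmem : x ∉ keptV (PySem.List.enumerate b) R := key.1 hpos
      have hlen := keptV_length (PySem.List.enumerate b) R hnd hR hRm
      rw [PySem.List.length_enumerate] at hlen
      have hA : stepA (c, keptV (PySem.List.enumerate b) R) x
          = (c + ((b.length : Int) - (R.length : Int)), keptV (PySem.List.enumerate b) R) := by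
        show pvInnerA x (keptV (PySem.List.enumerate b) R) c = _
        rw [innerA_spec, if_neg hnotmem]
        simp only [Prod.mk.injEq]
        exact ⟨by omega, trivial⟩
      have hB : stepB b (c, d, R) x
          = (c + ((b.length : Int) - (R.length : Int)), d, R) := by
        cases hg : PySem.Dict.get? d x with
        | none => simp only [stepB, hg]
        | some l =>
          have hle : l = [] := by
            have h0 := hinv x
            rw [PySem.Dict.getD_eq_get?_getD, hg] at h0
            simp only [Option.getD_some] at h0
            rw [h0, hpos]
          subst hle
          simp only [stepB, hg]
      rw [List.foldl_cons, List.foldl_cons, hA, hB]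
      exact ih _ d R hinv hR hRm
    | cons p rest =>
      have hpos : posR (PySem.List.enumerate b) x R = p :: rest := by rw [← hinv x]; exact hl
      have hget : PySem.Dict.get? d x = some (p :: rest) := by
        have h0 := hinv x
        rw [PySem.Dict.getD_eq_get?_getD] at h0
        cases hg : PySem.Dict.get? d x with
        | none =>
          rw [hg] at h0
          simp only [Option.getD_none] at h0
          rw [← h0] at hpos
          simp at hpos
        | some l =>
          rw [hg] at h0
          simp only [Option.getD_some] at h0
          rw [h0, hpos]
      obtain ⟨hmem, hidx, herase, hrest⟩ := key.2 p rest hpos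
      have hpR : p ∈ posR (PySem.List.enumerate b) x R := by
        rw [hpos]; exact List.mem_cons_self
      have hpe : (p, x) ∈ PySem.List.enumerate b := (mem_posR hpR).1
      have hpnotR : p ∉ R := (mem_posR hpR).2
      have hbefore : R.foldl (fun acc r => if r < p then acc + 1 else acc) (0 : Int)
          = (R.countP (fun r => decide (r < p)) : Int) := by
        rw [PySem.List.foldl_ite_add_one]
        ring
      have hcnt : R.countP (fun r => decide ((0 : Int) ≤ r ∧ r < p))
          = R.countP (fun r => decide (r < p)) := by
        apply List.countP_congr
        intro r hrR
        have hr0 := (PySem.List.mem_pyRange_one).mp (hIdx ▸ hRm r hrR)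
        simp only [decide_eq_true_eq]
        omega
      have hA : stepA (c, keptV (PySem.List.enumerate b) R) x
          = (c + p + 1 - (R.countP (fun r => decide (r < p)) : Int),
             keptV (PySem.List.enumerate b) (R ++ [p])) := by
        show pvInnerA x (keptV (PySem.List.enumerate b) R) c = _
        rw [innerA_spec, if_pos hmem]
        simp only [Prod.mk.injEq]
        refine ⟨by rw [hidx, ← hcnt]; omega, herase⟩
      have hB : stepB b (c, d, R) x
          = (c + p + 1 - (R.countP (fun r => decide (r < p)) : Int),
             d.insert x rest, R ++ [p]) := by
        simp only [stepB, hget, hbefore]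
      have hinv' : ∀ y, (d.insert x rest).getD y []
          = posR (PySem.List.enumerate b) y (R ++ [p]) := by
        intro y
        by_cases hyx : y = x
        · subst hyx
          rw [PySem.Dict.getD_insert_self]
          exact hrest
        · rw [PySem.Dict.getD_insert_of_ne d rest [] hyx, hinv y]
          symm
          apply posR_append_irrelevant
          intro q hq hqp
          subst hqp
          exact hyx (fst_inj hnd (mem_posF.mp hq) hpe)
      have hR' : (R ++ [p]).Nodup := by
        rw [List.nodup_append]
        refine ⟨hR, List.nodup_singleton _, fun q hqR w hw hqw => ?_⟩
        have hwp : w = p := List.mem_singleton.mp hw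
        exact hpnotR ((hqw.trans hwp) ▸ hqR)
      have hRm' : ∀ r ∈ R ++ [p], r ∈ (PySem.List.enumerate b).map (·.1) := by
        intro r hr
        rcases List.mem_append.mp hr with h | h
        · exact hRm r h
        · rw [List.mem_singleton.mp h]
          exact List.mem_map.mpr ⟨(p, x), hpe, rfl⟩
      rw [List.foldl_cons, List.foldl_cons, hA, hB]
      exact ih _ (d.insert x rest) (R ++ [p]) hinv' hR' hRm'

lemma cf_eq (a b : List Int) (count : Int) : cf_count a b count = cf_count_alt a b count := by
  unfold cf_count cf_count_alt
  have hA : (fun (s : Int × List Int) x => pvInnerA x s.2 s.1) = stepA := rfl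
  have hB : (fun (s : Int × PySem.Dict Int (List Int) × List Int) x =>
      match PySem.Dict.get? s.2.1 x with
      | some (p :: rest) =>
        let before := s.2.2.foldl (fun acc r => if r < p then acc + 1 else acc) (0 : Int)
        (s.1 + p + 1 - before, s.2.1.insert x rest, s.2.2 ++ [p])
      | _ => (s.1 + ((b.length : Int) - (s.2.2.length : Int)), s.2.1, s.2.2)) = stepB b := rfl
  rw [hA, hB]
  have hkept : keptV (PySem.List.enumerate b) [] = b := by
    unfold keptV
    simp [PySem.List.map_snd_enumerate]
  have hinv0 : ∀ x, ((PySem.List.enumerate b).foldl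
      (fun d iv => d.modify iv.2 [] (· ++ [iv.1])) PySem.Dict.empty).getD x []
        = posR (PySem.List.enumerate b) x [] := by
    intro x
    rw [build_getD]
    unfold posR
    simp
  show (a.foldl stepA ((0 : Int), b)).1
      = (a.foldl (stepB b)
          ((0 : Int),
           (PySem.List.enumerate b).foldl (fun d iv => d.modify iv.2 [] (· ++ [iv.1])) PySem.Dict.empty,
           ([] : List Int))).1
  conv_lhs => rw [← hkept]
  exact loopLemma b a 0 _ [] hinv0 List.nodup_nil (by simp)

-- ===== VERDICT (by name: the statement is the Claim_ definition above) =====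
theorem cf_count_spec : Claim_equal_cf_count := by
  intro a b count _
  show cf_count a b count = cf_count_alt a b count
  exact cf_eq a b count
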